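-- pv_equiv track=rewrite | github.com/radulaski/Tavis-Cummings-Hubbard-Heff | states_base.py | labels
-- ===== SOURCE A (Python) =====
-- def labels(states):
--     """
--     Args:
--         states: list of states
--     Returns:
--         list of labels for the vector components in the same order as the hamiltonian
--         in Latex for plots; indexed from 0
--         ex. e0,1 is emitter 1 in cavity 0
--     """
--     labels = []
--     for state in states:
--         s = list(set(state)) #unique locations only
--         s.sort()
--         label = ''
--         for quanta in s:
--             if quanta[1] == -1:
--                 m = state.count(quanta)
--                 m = str(m) if m>1 else ''
--                 label += str(m) + '$c_{' + '{}'.format(quanta[0]) + '}$'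
--             else:
--                 label += '$e_{'+'{},{}'.format(*quanta) + '}$'
--         labels.append(label)
--     return labels
-- ===== SOURCE B (Python) =====
-- def _runs(srt):
--     # maximal runs of equal adjacent elements of an already-sorted list
--     res = []
--     i = 0
--     while i < len(srt):
--         j = i + 1
--         while j < len(srt) and srt[j] == srt[i]:
--             j += 1
--         res.append((srt[i], j - i))
--         i = j
--     return res
--
--
-- def _piece(q, cnt):
--     if q[1] == -1:
--         return ('' if cnt == 1 else str(cnt)) + '$c_{' + str(q[0]) + '}$'
--     return '$e_{' + str(q[0]) + ',' + str(q[1]) + '}$'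
--
--
-- def labels(states):
--     out = []
--     for state in states:
--         out.append(''.join(_piece(q, c) for (q, c) in _runs(sorted(state))))
--     return out
-- ===== Notes on version B (the rewrite author's own statement) =====
-- stated objective: alternative
-- what changed: Replaces A's set-of-unique-locations plus a full state.count scan per unique location with a single sort followed by one run-length pass over the sorted state (groupby-style), reading each run's length as the count.
import Mathlib
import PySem

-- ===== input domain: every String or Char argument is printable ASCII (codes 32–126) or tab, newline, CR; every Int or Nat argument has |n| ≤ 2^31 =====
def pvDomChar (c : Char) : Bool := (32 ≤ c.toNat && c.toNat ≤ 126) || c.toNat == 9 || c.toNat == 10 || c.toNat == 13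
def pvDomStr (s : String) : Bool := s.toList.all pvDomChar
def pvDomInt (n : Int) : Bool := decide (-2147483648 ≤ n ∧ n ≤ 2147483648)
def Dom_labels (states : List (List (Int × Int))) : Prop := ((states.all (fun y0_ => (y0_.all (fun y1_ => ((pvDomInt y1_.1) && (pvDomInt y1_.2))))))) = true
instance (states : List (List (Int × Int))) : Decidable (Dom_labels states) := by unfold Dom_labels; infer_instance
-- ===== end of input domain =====

-- B replaces A's set-of-unique-locations plus per-location state.count scan by one sort plus a single run-length (groupby-style) pass.

-- ===== PORT A =====
-- Python tuples of ints compare lexicographically: key 'toLex' (Prod.Lex on Int × Int).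
def labels (states : List (List (Int × Int))) : List String :=
  states.foldl (fun labels state =>
    let s := PySem.List.sorted (PySem.Set.ofList state) (fun q => toLex q) false
    let label := s.foldl (fun label quanta =>
      if quanta.2 == -1 then
        let m := PySem.List.count state quanta
        let ms := if m > 1 then PySem.Int.toStr (m : Int) else ""
        label ++ ms ++ "$c_{" ++ PySem.Int.toStr quanta.1 ++ "}$"
      else
        label ++ "$e_{" ++ PySem.Int.toStr quanta.1 ++ "," ++ PySem.Int.toStr quanta.2 ++ "}$") ""
    labels ++ [label]) []

-- ===== PORT B =====
-- _runs: the inner while loop scanning each maximal run of the sorted list (j - i = run length)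
def bRuns : List (Int × Int) → List ((Int × Int) × Nat)
  | [] => []
  | q :: rest =>
      (q, 1 + (rest.takeWhile (fun x => x == q)).length) ::
        bRuns (rest.dropWhile (fun x => x == q))
  termination_by l => l.length
  decreasing_by
    have := List.length_dropWhile_le (fun x => x == q) rest
    simp only [List.length_cons]; omega

def bPiece (q : Int × Int) (cnt : Nat) : String :=
  if q.2 == -1 then
    (if cnt == 1 then "" else PySem.Int.toStr (cnt : Int)) ++ "$c_{" ++ PySem.Int.toStr q.1 ++ "}$"
  else
    "$e_{" ++ PySem.Int.toStr q.1 ++ "," ++ PySem.Int.toStr q.2 ++ "}$"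

def labels_alt (states : List (List (Int × Int))) : List String :=
  states.foldl (fun out state =>
    out ++ [PySem.Str.join ""
      ((bRuns (PySem.List.sorted state (fun q => toLex q) false)).map (fun pc => bPiece pc.1 pc.2))]) []

-- ===== PRECONDITION & SPEC =====
def Spec_labels (states : List (List (Int × Int))) (out : List String) : Prop := out = labels_alt states
instance (states : List (List (Int × Int))) (out : List String) : Decidable (Spec_labels states out) := by unfold Spec_labels; infer_instance

-- ===== CLAIM (what is proved, stated in full; the proofs are below) =====
def Claim_equal_labels : Prop := ∀ (states : List (List (Int × Int))), Dom_labels states → Spec_labels states (labels states)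

-- ===== LEMMAS AND PROOFS =====

theorem pv_dropWhile_head_false {α : Type} (p : α → Bool) (l : List α) (x : α) (d : List α)
    (h : l.dropWhile p = x :: d) : p x = false := by
  induction l with
  | nil => simp at h
  | cons a t ih =>
    rw [List.dropWhile_cons] at h
    by_cases hp : p a = true
    · exact ih (by simpa [hp] using h)
    · have hax : a = x := by simp [hp] at h; exact h.1
      subst hax; simpa using hp

-- On a lex-sorted list, the head never reappears after its initial run.
theorem pv_not_mem_drop (q : Int × Int) (rest : List (Int × Int))
    (h : (q :: rest).Pairwise (fun a b => toLex a ≤ toLex b)) :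
    q ∉ rest.dropWhile (fun x => x == q) := by
  intro hq
  rcases List.pairwise_cons.mp h with ⟨hhead, hrest⟩
  cases hdnil : rest.dropWhile (fun x => x == q) with
  | nil => rw [hdnil] at hq; simp at hq
  | cons x d' =>
    rw [hdnil] at hq
    have hx : (x == q) = false := pv_dropWhile_head_false _ rest x d' hdnil
    have hxq : x ≠ q := by simpa using hx
    have hdp : (rest.dropWhile (fun y => y == q)).Pairwise (fun a b => toLex a ≤ toLex b) :=
      List.Pairwise.sublist (List.dropWhile_sublist _) hrest
    have hxmem : x ∈ rest := (List.dropWhile_sublist _).mem (by rw [hdnil]; exact List.mem_cons_self)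
    have hqx : toLex q ≤ toLex x := hhead x hxmem
    rcases List.mem_cons.mp hq with rfl | hq'
    · exact hxq rfl
    · have hxd : toLex x ≤ toLex q := by
        have hdp' : (x :: d').Pairwise (fun a b => toLex a ≤ toLex b) := hdnil ▸ hdp
        exact (List.pairwise_cons.mp hdp').1 q hq'
      exact hxq (toLex.injective (le_antisymm hxd hqx))

theorem pv_count_head (q : Int × Int) (rest : List (Int × Int))
    (h : (q :: rest).Pairwise (fun a b => toLex a ≤ toLex b)) :
    List.count q (q :: rest) = 1 + (rest.takeWhile (fun x => x == q)).length := by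
  have hsplit : rest = rest.takeWhile (fun x => x == q) ++ rest.dropWhile (fun x => x == q) :=
    (List.takeWhile_append_dropWhile).symm
  have htk : List.count q (rest.takeWhile (fun x => x == q)) = (rest.takeWhile (fun x => x == q)).length := by
    rw [List.count_eq_length]
    intro b hb
    have hbq : (b == q) = true := List.mem_takeWhile_imp (p := fun x => x == q) hb
    exact (beq_iff_eq.mp hbq).symm
  have hdr : List.count q (rest.dropWhile (fun x => x == q)) = 0 :=
    List.count_eq_zero.mpr (pv_not_mem_drop q rest h)
  calc List.count q (q :: rest) = 1 + List.count q rest := by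
        rw [List.count_cons_self]; omega
    _ = 1 + (rest.takeWhile (fun x => x == q)).length := by
        conv_lhs => rw [hsplit]
        rw [List.count_append, htk, hdr]; omega

theorem pv_count_drop (q : Int × Int) (rest : List (Int × Int))
    (h : (q :: rest).Pairwise (fun a b => toLex a ≤ toLex b))
    (r : Int × Int) (hr : r ∈ rest.dropWhile (fun x => x == q)) :
    List.count r (q :: rest) = List.count r (rest.dropWhile (fun x => x == q)) := by
  have hrq : r ≠ q := fun hrq => pv_not_mem_drop q rest h (hrq ▸ hr)
  have hsplit : rest = rest.takeWhile (fun x => x == q) ++ rest.dropWhile (fun x => x == q) :=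
    (List.takeWhile_append_dropWhile).symm
  have htk : List.count r (rest.takeWhile (fun x => x == q)) = 0 := by
    rw [List.count_eq_zero]
    intro hmem
    exact hrq (by simpa using List.mem_takeWhile_imp hmem)
  have hqr : (q == r) = false := by simpa [beq_iff_eq] using Ne.symm hrq
  calc List.count r (q :: rest) = List.count r rest := by rw [List.count_cons, hqr]; simp
    _ = _ := by conv_lhs => rw [hsplit]
                rw [List.count_append, htk]; omega

theorem pv_mem_fst_bRuns (l : List (Int × Int)) (x : Int × Int) :
    x ∈ (bRuns l).map Prod.fst ↔ x ∈ l := by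
  induction l using bRuns.induct with
  | case1 => simp [bRuns]
  | case2 q rest ih =>
    rw [bRuns]
    simp only [List.map_cons, List.mem_cons, ih]
    constructor
    · rintro (rfl | hx)
      · exact Or.inl rfl
      · exact Or.inr ((List.dropWhile_sublist _).mem hx)
    · rintro (rfl | hx)
      · exact Or.inl rfl
      · conv at hx => rw [← List.takeWhile_append_dropWhile (p := fun y => y == q) (l := rest)]
        rcases List.mem_append.mp hx with hx | hx
        · exact Or.inl (by simpa using List.mem_takeWhile_imp hx)
        · exact Or.inr hx

theorem pv_pairwise_lt_fst_bRuns (l : List (Int × Int))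
    (h : l.Pairwise (fun a b => toLex a ≤ toLex b)) :
    ((bRuns l).map Prod.fst).Pairwise (fun a b => toLex a < toLex b) := by
  induction l using bRuns.induct with
  | case1 => simp [bRuns]
  | case2 q rest ih =>
    rw [bRuns]
    rcases List.pairwise_cons.mp h with ⟨hhead, hrest⟩
    have hdp : (rest.dropWhile (fun x => x == q)).Pairwise (fun a b => toLex a ≤ toLex b) :=
      List.Pairwise.sublist (List.dropWhile_sublist _) hrest
    simp only [List.map_cons, List.pairwise_cons]
    refine ⟨?_, ih hdp⟩
    intro x hx
    have hxd : x ∈ rest.dropWhile (fun y => y == q) := (pv_mem_fst_bRuns _ x).mp hx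
    have hxr : x ∈ rest := (List.dropWhile_sublist _).mem hxd
    have hle : toLex q ≤ toLex x := hhead x hxr
    have hne : q ≠ x := fun hqx => pv_not_mem_drop q rest h (hqx ▸ hxd)
    exact lt_of_le_of_ne hle (fun he => hne (toLex.injective he))

theorem pv_bRuns_eq (l : List (Int × Int))
    (h : l.Pairwise (fun a b => toLex a ≤ toLex b)) :
    bRuns l = ((bRuns l).map Prod.fst).map (fun r => (r, List.count r l)) := by
  induction l using bRuns.induct with
  | case1 => simp [bRuns]
  | case2 q rest ih =>
    rcases List.pairwise_cons.mp h with ⟨_, hrest⟩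
    have hdp : (rest.dropWhile (fun x => x == q)).Pairwise (fun a b => toLex a ≤ toLex b) :=
      List.Pairwise.sublist (List.dropWhile_sublist _) hrest
    rw [bRuns]
    simp only [List.map_cons]
    refine congrArg₂ _ ?_ ?_
    · exact congrArg _ (pv_count_head q rest h).symm
    · calc bRuns (rest.dropWhile (fun x => x == q))
            = ((bRuns (rest.dropWhile (fun x => x == q))).map Prod.fst).map
                (fun r => (r, List.count r (rest.dropWhile (fun x => x == q)))) := ih hdp
        _ = _ := by
            refine List.map_congr_left ?_
            intro r hr
            have hrd : r ∈ rest.dropWhile (fun x => x == q) := (pv_mem_fst_bRuns _ r).mp hr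
            rw [pv_count_drop q rest h r hrd]

-- sorted(set(state)) is exactly the distinct locations of sorted(state) in run order
theorem pv_sorted_set_eq (state : List (Int × Int)) :
    PySem.List.sorted (PySem.Set.ofList state) (fun q => toLex q) false
      = (bRuns (PySem.List.sorted state (fun q => toLex q) false)).map Prod.fst := by
  set t := PySem.List.sorted state (fun q => toLex q) false with ht
  have hpt : t.Pairwise (fun a b => toLex a ≤ toLex b) :=
    PySem.List.sorted_pairwise state (fun q => toLex q)
  have hlt : ((bRuns t).map Prod.fst).Pairwise (fun a b => toLex a < toLex b) :=
    pv_pairwise_lt_fst_bRuns t hpt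
  apply PySem.List.sorted_eq_of_perm_of_pairwise_lt
  · rw [List.perm_ext_iff_of_nodup]
    · intro a
      rw [pv_mem_fst_bRuns, PySem.Set.mem_ofList]
      exact (PySem.List.mem_sorted state (fun q => toLex q) false a)
    · exact List.Pairwise.imp (fun hab he => absurd (he ▸ hab) (lt_irrefl _)) hlt
    · exact PySem.Set.nodup_ofList state
  · exact hlt

theorem pv_join_cons (s : String) (rest : List String) :
    PySem.Str.join "" (s :: rest) = s ++ PySem.Str.join "" rest := by
  apply String.toList_inj.mp
  rw [PySem.Str.toList_join, String.toList_append, PySem.Str.toList_join]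
  cases rest with
  | nil => rw [List.map_singleton, PySem.Chars.join_singleton, List.map_nil, PySem.Chars.join_nil]
           simp
  | cons b r => rw [List.map_cons, List.map_cons, PySem.Chars.join_cons_cons]
                simp

theorem pv_foldl_str {α : Type} (f : α → String) (l : List α) :
    ∀ acc : String, l.foldl (fun a x => a ++ f x) acc = acc ++ PySem.Str.join "" (l.map f) := by
  induction l with
  | nil =>
    intro acc
    apply String.toList_inj.mp
    simp [PySem.Str.toList_join, PySem.Chars.join_nil, String.toList_append]
  | cons x xs ih =>
    intro acc
    rw [List.foldl_cons, ih, List.map_cons, pv_join_cons, String.append_assoc]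

theorem pv_per_state (state : List (Int × Int)) :
    (PySem.List.sorted (PySem.Set.ofList state) (fun q => toLex q) false).foldl
      (fun label quanta =>
        if quanta.2 == -1 then
          let m := PySem.List.count state quanta
          let ms := if m > 1 then PySem.Int.toStr (m : Int) else ""
          label ++ ms ++ "$c_{" ++ PySem.Int.toStr quanta.1 ++ "}$"
        else
          label ++ "$e_{" ++ PySem.Int.toStr quanta.1 ++ "," ++ PySem.Int.toStr quanta.2 ++ "}$") ""
    = PySem.Str.join ""
        ((bRuns (PySem.List.sorted state (fun q => toLex q) false)).map (fun pc => bPiece pc.1 pc.2)) := by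
  set t := PySem.List.sorted state (fun q => toLex q) false with ht
  have hpt : t.Pairwise (fun a b => toLex a ≤ toLex b) :=
    PySem.List.sorted_pairwise state (fun q => toLex q)
  -- A's loop body appends one chunk per location
  have hA : (PySem.List.sorted (PySem.Set.ofList state) (fun q => toLex q) false).foldl
      (fun label quanta =>
        if quanta.2 == -1 then
          let m := PySem.List.count state quanta
          let ms := if m > 1 then PySem.Int.toStr (m : Int) else ""
          label ++ ms ++ "$c_{" ++ PySem.Int.toStr quanta.1 ++ "}$"
        else
          label ++ "$e_{" ++ PySem.Int.toStr quanta.1 ++ "," ++ PySem.Int.toStr quanta.2 ++ "}$") ""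
      = (PySem.List.sorted (PySem.Set.ofList state) (fun q => toLex q) false).foldl
          (fun label quanta => label ++ bPiece quanta (List.count quanta state)) "" := by
    apply PySem.List.foldl_congr_mem'
    intro q hq acc
    have hqs : q ∈ state := by
      rw [PySem.List.mem_sorted, PySem.Set.mem_ofList] at hq
      exact hq
    have hcnt : 1 ≤ List.count q state := List.count_pos_iff.mpr hqs
    by_cases hcav : q.2 = -1
    · by_cases h1 : List.count q state = 1
      · simp [bPiece, PySem.List.count, hcav, h1, String.append_assoc]
      · have h2 : 1 < List.count q state := by omega
        have h1' : (List.count q state == 1) = false := by simpa [beq_iff_eq] using h1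
        simp [bPiece, PySem.List.count, hcav, h2, h1', String.append_assoc]
    · simp [bPiece, hcav, String.append_assoc]
  rw [hA, pv_foldl_str (fun q => bPiece q (List.count q state)), pv_sorted_set_eq,
      String.empty_append]
  apply congrArg
  conv_rhs => rw [pv_bRuns_eq t hpt]
  simp only [List.map_map]
  apply List.map_congr_left
  intro pc _
  have hc : List.count pc.1 t = List.count pc.1 state :=
    (PySem.List.sorted_perm state (fun q => toLex q) false).count_eq pc.1
  simp [Function.comp, hc]

-- ===== VERDICT (by name: the statement is the Claim_ definition above) =====
theorem labels_spec : Claim_equal_labels := by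
  intro states _
  unfold Spec_labels
  have hA : labels states = states.map (fun state =>
      (PySem.List.sorted (PySem.Set.ofList state) (fun q => toLex q) false).foldl
        (fun label quanta =>
          if quanta.2 == -1 then
            let m := PySem.List.count state quanta
            let ms := if m > 1 then PySem.Int.toStr (m : Int) else ""
            label ++ ms ++ "$c_{" ++ PySem.Int.toStr quanta.1 ++ "}$"
          else
            label ++ "$e_{" ++ PySem.Int.toStr quanta.1 ++ "," ++ PySem.Int.toStr quanta.2 ++ "}$") "") := by
    exact PySem.List.foldl_append_singleton_eq_map _ states []
  have hB : labels_alt states = states.map (fun state =>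
      PySem.Str.join ""
        ((bRuns (PySem.List.sorted state (fun q => toLex q) false)).map (fun pc => bPiece pc.1 pc.2))) := by
    exact PySem.List.foldl_append_singleton_eq_map _ states []
  rw [hA, hB]
  exact List.map_congr_left (fun state _ => pv_per_state state)
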